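-- pv_equiv track=rewrite | github.com/rognit/MastermindMCTS | old.py | strategy1
-- ===== SOURCE A (Python) =====
-- def evaluate_proposal(guess, secret_code):
--     exact = sum([1 for i in range(len(secret_code)) if guess[i] == secret_code[i]])
--     return exact, sum([min(guess.count(j), secret_code.count(j)) for j in set(guess)]) - exact
--
-- def strategy1(possible_codes):
--     # We will choose the proposal that will eliminate the most possible codes
--     max_elimination = 0
--     best_proposal = None
--     for proposal in possible_codes:
--         elimination = 0
--         for code in possible_codes:
--             if evaluate_proposal(proposal, code) == (0, 0):
--                 elimination += 1
--         if elimination > max_elimination: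
--             max_elimination = elimination
--             best_proposal = proposal
--     return best_proposal
-- ===== SOURCE B (Python) =====
-- def strategy1(possible_codes):
--     # Group codes by their (canonical) color set, score each distinct set once
--     # against the groups, then pick the first code whose score is the strict max.
--     counts = {}
--     for code in possible_codes:
--         key = tuple(sorted(set(code)))
--         counts[key] = counts.get(key, 0) + 1
--     items = list(counts.items())
--     elim = {}
--     for s, _ in items:
--         ss = set(s)
--         elim[s] = sum(c for t, c in items if ss.isdisjoint(t))
--     max_elimination = 0
--     best_proposal = None
--     for code in possible_codes:
--         e = elim[tuple(sorted(set(code)))]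
--         if e > max_elimination:
--             max_elimination = e
--             best_proposal = code
--     return best_proposal
-- ===== Notes on version B (the rewrite author's own statement) =====
-- stated objective: faster
-- what changed: B replaces A's per-pair evaluate_proposal (exact-match plus min-of-counts bookkeeping, recomputed for every ordered pair of codes) by grouping codes into a dict keyed by their canonical distinct-color set, scoring each distinct set once via set disjointness against the groups, and then picking the first code whose group score is the strict maximum.
import Mathlib
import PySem

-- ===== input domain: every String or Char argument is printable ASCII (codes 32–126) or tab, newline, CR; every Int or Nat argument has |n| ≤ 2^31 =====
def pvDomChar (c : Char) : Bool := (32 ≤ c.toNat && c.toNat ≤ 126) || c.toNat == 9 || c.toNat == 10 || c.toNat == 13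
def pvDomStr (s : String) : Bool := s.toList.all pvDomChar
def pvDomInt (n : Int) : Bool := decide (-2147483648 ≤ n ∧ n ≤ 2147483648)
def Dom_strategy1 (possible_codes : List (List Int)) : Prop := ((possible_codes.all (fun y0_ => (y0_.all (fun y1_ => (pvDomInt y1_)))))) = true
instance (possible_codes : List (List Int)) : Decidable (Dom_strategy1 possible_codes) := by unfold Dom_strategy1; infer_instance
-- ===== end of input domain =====

-- B groups codes by their canonical distinct-color set and scores each distinct set once
-- against the groups; A rescores every ordered pair with evaluate_proposal. Return value only;
-- neither program mutates its argument.

-- ===== PORT A =====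
-- evaluate_proposal(guess, secret_code)
def evaluateProposal (guess secret_code : List Int) : Int × Int :=
  let exact : Int :=
    (((PySem.List.pyRange 0 (PySem.List.len secret_code) 1).filter
        (fun i => PySem.List.pyGet? guess i == PySem.List.pyGet? secret_code i)).map
      (fun _ => (1 : Int))).sum
  (exact,
    ((PySem.Set.ofList guess).map
        (fun j => min ((PySem.List.count guess j : Int)) ((PySem.List.count secret_code j : Int)))).sum
      - exact)

def strategy1 (possible_codes : List (List Int)) : Option (List Int) :=
  (possible_codes.foldl
    (fun (st : Int × Option (List Int)) proposal =>
      let elimination : Int :=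
        possible_codes.foldl
          (fun e code => if evaluateProposal proposal code = (0, 0) then e + 1 else e) 0
      if elimination > st.1 then (elimination, some proposal) else st)
    (0, none)).2

-- ===== PORT B =====
-- tuple(sorted(set(code)))
def keyOf (code : List Int) : List Int :=
  PySem.List.sorted (PySem.Set.ofList code) (fun x => x) false

def strategy1_alt (possible_codes : List (List Int)) : Option (List Int) :=
  let counts : PySem.Dict (List Int) Int :=
    possible_codes.foldl
      (fun d code =>
        let key := keyOf code
        d.insert key (d.getD key 0 + 1)) PySem.Dict.empty
  let items := counts.items
  let elim : PySem.Dict (List Int) Int :=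
    items.foldl
      (fun d p =>
        let ss := PySem.Set.ofList p.1
        d.insert p.1
          (items.foldl (fun acc q => if PySem.Set.isdisjoint ss q.1 then acc + q.2 else acc) 0))
      PySem.Dict.empty
  (possible_codes.foldl
    (fun (st : Int × Option (List Int)) code =>
      let e := elim.getD (keyOf code) 0
      if e > st.1 then (e, some code) else st)
    (0, none)).2

-- ===== PRECONDITION & SPEC =====
-- Pre_ excludes lists containing two codes of different lengths: on those A's
-- evaluate_proposal raises IndexError (guess[i] for i in range(len(secret_code))).
def Pre_strategy1 (possible_codes : List (List Int)) : Prop :=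
  ∀ a ∈ possible_codes, ∀ b ∈ possible_codes, a.length = b.length
instance (possible_codes : List (List Int)) : Decidable (Pre_strategy1 possible_codes) := by
  unfold Pre_strategy1; infer_instance
def pvWitness_strategy1 : List (List Int) := [[1, 2], [3, 4], [1, 3]]

def Spec_strategy1 (possible_codes : List (List Int)) (out : Option (List Int)) : Prop :=
  out = strategy1_alt possible_codes
instance (possible_codes : List (List Int)) (out : Option (List Int)) :
    Decidable (Spec_strategy1 possible_codes out) := by unfold Spec_strategy1; infer_instance

-- ===== CLAIM (what is proved, stated in full; the proofs are below) =====
def Claim_equal_strategy1 : Prop :=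
  ∀ (possible_codes : List (List Int)), Dom_strategy1 possible_codes →
    Pre_strategy1 possible_codes → Spec_strategy1 possible_codes (strategy1 possible_codes)

-- ===== LEMMAS AND PROOFS =====

-- A's pair score is (0, 0) exactly when the two codes share no color (for equal-length codes).
theorem eval_zero_iff (p c : List Int) (hlen : p.length = c.length) :
    (evaluateProposal p c = ((0:Int), 0)) ↔
      PySem.Set.isdisjoint (PySem.Set.ofList p) (PySem.Set.ofList c) = true := by
  unfold evaluateProposal
  simp only [Prod.mk.injEq]
  have hcast : ((PySem.Set.ofList p).map
      (fun j => min ((PySem.List.count p j : Int)) ((PySem.List.count c j : Int)))).sum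
      = (((PySem.Set.ofList p).map (fun j => min (List.count j p) (List.count j c))).sum : Int) := by
    rw [Nat.cast_list_sum, List.map_map]
    apply congrArg
    apply List.map_congr_left
    intro j _
    simp [PySem.List.count_eq, Function.comp]
  have hothers : ((((PySem.Set.ofList p).map (fun j => min (List.count j p) (List.count j c))).sum : Nat) = 0)
      ↔ PySem.Set.isdisjoint (PySem.Set.ofList p) (PySem.Set.ofList c) = true := by
    rw [List.sum_eq_zero_iff, PySem.Set.isdisjoint_iff]
    constructor
    · intro h x hx hxc
      have hmin := h _ (List.mem_map_of_mem (f := fun j => min (List.count j p) (List.count j c)) hx)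
      have hxp : x ∈ p := (PySem.Set.mem_ofList p x).mp hx
      have hxc' : x ∈ c := (PySem.Set.mem_ofList c x).mp hxc
      have h1 : 0 < List.count x p := List.count_pos_iff.mpr hxp
      have h2 : 0 < List.count x c := List.count_pos_iff.mpr hxc'
      rw [Nat.min_eq_zero_iff] at hmin
      omega
    · intro h y hy
      rcases List.mem_map.mp hy with ⟨j, hj, rfl⟩
      have hjc : j ∉ c := fun hc => h j hj ((PySem.Set.mem_ofList c j).mpr hc)
      simp [List.count_eq_zero_of_not_mem hjc]
  constructor
  · rintro ⟨h1, h2⟩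
    rw [hcast] at h2
    have hn : (((PySem.Set.ofList p).map (fun j => min (List.count j p) (List.count j c))).sum : Int) = 0 := by
      omega
    exact hothers.mp (by exact_mod_cast hn)
  · intro hdisj
    have hd := (PySem.Set.isdisjoint_iff _ _).mp hdisj
    have hfilt : (PySem.List.pyRange 0 (PySem.List.len c) 1).filter
        (fun i => PySem.List.pyGet? p i == PySem.List.pyGet? c i) = [] := by
      rw [List.filter_eq_nil_iff]
      intro i hi
      simp only [PySem.List.len_eq] at hi
      have hir := (PySem.List.mem_pyRange_one).mp hi
      have h0 : (0:Int) ≤ i := hir.1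
      have h1p : i < (p.length : Int) := by omega
      have h1c : i < (c.length : Int) := hir.2
      rw [PySem.List.pyGet?_eq_some_getElem p h0 h1p,
          PySem.List.pyGet?_eq_some_getElem c h0 h1c]
      simp only [beq_iff_eq, Option.some.injEq]
      intro heq
      have hltp : i.toNat < p.length := by omega
      have hltc : i.toNat < c.length := by omega
      have hmp := List.getElem_mem hltp
      have hmc := List.getElem_mem hltc
      exact hd _ ((PySem.Set.mem_ofList p _).mpr hmp)
        (heq ▸ (PySem.Set.mem_ofList c _).mpr hmc)
    rw [hfilt]
    refine ⟨by simp, ?_⟩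
    rw [hcast, hothers.mpr hdisj]
    simp

theorem mem_keyOf (code : List Int) (x : Int) : x ∈ keyOf code ↔ x ∈ code := by
  unfold keyOf
  rw [PySem.List.mem_sorted]
  exact PySem.Set.mem_ofList code x

-- List.count does not depend on which (lawful) BEq instance is used.
theorem pv_count_irrel {α : Type} (i1 i2 : BEq α) (h1 : @LawfulBEq α i1) (h2 : @LawfulBEq α i2)
    (x : α) (l : List α) : @List.count α i1 x l = @List.count α i2 x l := by
  have hd : DecidableEq α := fun a b => @instDecidableEqOfLawfulBEq α i1 h1 a b
  induction l with
  | nil => rfl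
  | cons a t ih =>
    rw [@List.count_cons α i1, @List.count_cons α i2, ih,
      @beq_eq_decide α i1 h1 hd a x, @beq_eq_decide α i2 h2 hd a x]

-- counting over the distinct keys with multiplicities equals counting over the raw list
theorem pv_group (ks : List (List Int)) (P : List Int → Bool) :
    ((PySem.Set.ofList ks).map (fun k => if P k then ((List.count k ks : Nat) : Int) else 0)).sum
      = (ks.countP P : Int) := by
  have hperm : (PySem.Set.ofList ks).Perm ks.dedup := by
    apply (List.perm_ext_iff_of_nodup (PySem.Set.nodup_ofList ks) ks.nodup_dedup).mpr
    intro x; simp [PySem.Set.mem_ofList]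
  rw [(hperm.map _).sum_eq]
  have h2 : (ks.dedup.map (fun k => if P k then ((List.count k ks : Nat) : Int) else 0)).sum
      = ((ks.dedup.filter P).map (fun k => ((List.count k ks : Nat) : Int))).sum := by
    induction ks.dedup with
    | nil => simp
    | cons x xs ih => by_cases h : P x <;> simp [h, ih]
  rw [h2, ← List.sum_map_count_dedup_filter_eq_countP P ks]
  generalize ks.dedup.filter P = l
  induction l with
  | nil => simp
  | cons x xs ih =>
    simp [ih]
    exact pv_count_irrel _ _ inferInstance inferInstance x ks

theorem disj_key (p c : List Int) :
    PySem.Set.isdisjoint (PySem.Set.ofList (keyOf p)) (keyOf c)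
      = PySem.Set.isdisjoint (PySem.Set.ofList p) (PySem.Set.ofList c) := by
  rw [Bool.eq_iff_iff]
  rw [PySem.Set.isdisjoint_iff, PySem.Set.isdisjoint_iff]
  constructor
  · intro h x hx hxc
    exact h x ((PySem.Set.mem_ofList _ _).mpr ((mem_keyOf p x).mpr ((PySem.Set.mem_ofList _ _).mp hx)))
      ((mem_keyOf c x).mpr ((PySem.Set.mem_ofList _ _).mp hxc))
  · intro h x hx hxc
    exact h x ((PySem.Set.mem_ofList _ _).mpr ((mem_keyOf p x).mp ((PySem.Set.mem_ofList _ _).mp hx)))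
      ((PySem.Set.mem_ofList _ _).mpr ((mem_keyOf c x).mp hxc))

theorem strategy1_main (pc : List (List Int))
    (hpre : ∀ a ∈ pc, ∀ b ∈ pc, a.length = b.length) :
    strategy1 pc = strategy1_alt pc := by
  simp only [strategy1, strategy1_alt]
  -- name the pieces of B
  set ks : List (List Int) := pc.map keyOf with hks
  have hcounts : pc.foldl
      (fun d code => d.insert (keyOf code) (d.getD (keyOf code) 0 + 1)) PySem.Dict.empty
      = PySem.Dict.counter ks := by
    rw [hks, ← List.foldl_map (f := keyOf) (g := fun (d : PySem.Dict (List Int) Int) k => d.insert k (d.getD k 0 + 1))]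
    exact PySem.Dict.foldl_insert_getD_add_one_eq_counter ks
  refine congrArg Prod.snd (PySem.List.foldl_congr_mem pc _ _ ((0 : Int), (none : Option (List Int))) ?_)
  intro st code hcode
  have hx : pc.foldl (fun e c => if evaluateProposal code c = (0, 0) then e + 1 else e) (0 : Int)
      = ((((pc.foldl (fun d code => d.insert (keyOf code) (d.getD (keyOf code) 0 + 1))
              (PySem.Dict.empty : PySem.Dict (List Int) Int)).items).foldl
          (fun d p => d.insert p.1
            (((pc.foldl (fun d code => d.insert (keyOf code) (d.getD (keyOf code) 0 + 1))
                (PySem.Dict.empty : PySem.Dict (List Int) Int)).items).foldl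
              (fun acc q => if PySem.Set.isdisjoint (PySem.Set.ofList p.1) q.1 then acc + q.2 else acc) 0))
          PySem.Dict.empty).getD (keyOf code) 0) := by
    rw [hcounts, PySem.Dict.items_counter ks]
    -- the list of (distinct key, multiplicity) pairs
    have hfst : ((PySem.Set.ofList ks).map (fun k => (k, (List.count k ks : Int)))).map Prod.fst
        = PySem.Set.ofList ks := by
      rw [List.map_map]; simp [Function.comp_def]
    have hnd : (((PySem.Set.ofList ks).map (fun k => (k, (List.count k ks : Int)))).map Prod.fst).Nodup := by
      rw [hfst]; exact PySem.Set.nodup_ofList ks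
    have helims := PySem.Dict.items_foldl_insert_fresh
      ((PySem.Set.ofList ks).map (fun k => (k, (List.count k ks : Int))))
      Prod.fst
      (fun p => ((PySem.Set.ofList ks).map (fun k => (k, (List.count k ks : Int)))).foldl
        (fun acc q => if PySem.Set.isdisjoint (PySem.Set.ofList p.1) q.1 then acc + q.2 else acc) 0)
      PySem.Dict.empty
      (fun a _ => rfl)
      hnd
    have hkmem : keyOf code ∈ PySem.Set.ofList ks := by
      rw [PySem.Set.mem_ofList]
      rw [hks]
      exact List.mem_map_of_mem hcode
    have hmem : ((keyOf code),
        ((PySem.Set.ofList ks).map (fun k => (k, (List.count k ks : Int)))).foldl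
          (fun acc q => if PySem.Set.isdisjoint (PySem.Set.ofList (keyOf code)) q.1 then acc + q.2 else acc) 0)
        ∈ (((PySem.Set.ofList ks).map (fun k => (k, (List.count k ks : Int)))).foldl
            (fun d p => d.insert p.1
              (((PySem.Set.ofList ks).map (fun k => (k, (List.count k ks : Int)))).foldl
                (fun acc q => if PySem.Set.isdisjoint (PySem.Set.ofList p.1) q.1 then acc + q.2 else acc) 0))
            (PySem.Dict.empty : PySem.Dict (List Int) Int)).items := by
      rw [helims]
      simp
      exact Or.inr ((PySem.Set.mem_ofList ks (keyOf code)).mp hkmem)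
    have hkeysnd : ((((PySem.Set.ofList ks).map (fun k => (k, (List.count k ks : Int)))).foldl
            (fun d p => d.insert p.1
              (((PySem.Set.ofList ks).map (fun k => (k, (List.count k ks : Int)))).foldl
                (fun acc q => if PySem.Set.isdisjoint (PySem.Set.ofList p.1) q.1 then acc + q.2 else acc) 0))
            (PySem.Dict.empty : PySem.Dict (List Int) Int)).keys).Nodup := by
      apply PySem.Dict.nodup_keys_foldl_insert_key
      simp [PySem.Dict.keys_empty]
    rw [PySem.Dict.getD_of_mem_items _ hmem hkeysnd 0]
    rw [PySem.List.foldl_congr_mem _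
      (fun acc q => if PySem.Set.isdisjoint (PySem.Set.ofList (keyOf code)) q.1 then acc + q.2 else acc)
      (fun acc (q : List Int × Int) => acc + (if PySem.Set.isdisjoint (PySem.Set.ofList (keyOf code)) q.1 then q.2 else 0))
      0 (by intro acc q _; dsimp only; split <;> simp)]
    rw [PySem.List.foldl_add, List.map_map]
    rw [PySem.List.foldl_ite_add_one (p := fun c => evaluateProposal code c = (0, 0)) pc 0]
    have hmapeq : List.map
        ((fun (q : List Int × Int) =>
            if PySem.Set.isdisjoint (PySem.Set.ofList (keyOf code)) q.1 then q.2 else 0) ∘ fun k =>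
          (k, ((List.count k ks : Nat) : Int))) (PySem.Set.ofList ks)
        = List.map (fun k =>
            if PySem.Set.isdisjoint (PySem.Set.ofList (keyOf code)) k then ((List.count k ks : Nat) : Int) else 0)
          (PySem.Set.ofList ks) := rfl
    rw [hmapeq, pv_group ks (fun k => PySem.Set.isdisjoint (PySem.Set.ofList (keyOf code)) k)]
    have hcnt : pc.countP (fun c => decide (evaluateProposal code c = (0, 0)))
        = ks.countP (fun k => PySem.Set.isdisjoint (PySem.Set.ofList (keyOf code)) k) := by
      rw [hks, List.countP_map]
      apply List.countP_congr
      intro c hc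
      simp only [Function.comp_apply, decide_eq_true_iff, disj_key code c]
      exact eval_zero_iff code c (hpre code hcode c hc)
    rw [hcnt]
  rw [hx]

-- ===== VERDICT (by name: the statement is the Claim_ definition above) =====
theorem strategy1_spec : Claim_equal_strategy1 := by
  intro pc _ hpre
  exact strategy1_main pc hpre
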